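-- pv_equiv track=rewrite | github.com/suyash754/LP4 | combination product.py | count_triplets_with_product_m
-- ===== SOURCE A (Python) =====
-- def count_triplets_with_product_m(m, arr):
--     n = len(arr)
--     count = 0
--
--     # Use three nested loops to find all unique triplets
--     for i in range(n):
--         for j in range(i + 1, n):
--             for k in range(j + 1, n):
--                 # Check if the product of arr[i], arr[j], arr[k] equals m
--                 if arr[i] * arr[j] * arr[k] == m:
--                     count += 1
--
--     return count
-- ===== SOURCE B (Python) =====
-- def count_triplets_with_product_m(m, arr):
--     count = 0
--     rest = list(arr)
--     while rest:
--         ai = rest.pop(0)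
--         later = {}
--         total = 0
--         for x in reversed(rest):
--             p = ai * x
--             if p == 0:
--                 if m == 0:
--                     count += total
--             elif m % p == 0:
--                 count += later.get(m // p, 0)
--             later[x] = later.get(x, 0) + 1
--             total += 1
--     return count
-- ===== Notes on version B (the rewrite author's own statement) =====
-- stated objective: faster
-- what changed: Replaced the triple nested index loop by an O(n^2) pair scan: for each first element, walk the remaining list backwards keeping a hash counter of the elements already seen (the candidates for the third index) and add the count of the required third value m//(a_i*a_j) by one dictionary lookup, with a running total handling the zero-product case.
import Mathlib
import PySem

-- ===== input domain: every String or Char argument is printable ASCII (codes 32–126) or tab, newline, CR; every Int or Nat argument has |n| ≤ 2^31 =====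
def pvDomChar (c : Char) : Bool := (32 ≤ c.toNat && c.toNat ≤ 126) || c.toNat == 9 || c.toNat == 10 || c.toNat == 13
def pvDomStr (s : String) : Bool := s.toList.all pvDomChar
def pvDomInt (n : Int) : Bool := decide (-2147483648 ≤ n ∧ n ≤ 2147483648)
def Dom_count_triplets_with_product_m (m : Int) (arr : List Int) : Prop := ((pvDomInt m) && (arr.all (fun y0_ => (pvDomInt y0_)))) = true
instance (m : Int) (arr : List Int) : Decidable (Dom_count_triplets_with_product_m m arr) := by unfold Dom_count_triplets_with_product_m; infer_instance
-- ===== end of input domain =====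

-- B replaces A's cubic triple loop by a quadratic pair scan with a hash counter of later elements; ports proved to agree on all inputs.


-- ===== PORT A =====
-- literal transliteration of A: three nested index loops counting triples i<j<k with arr[i]*arr[j]*arr[k] == m
def count_triplets_with_product_m (m : Int) (arr : List Int) : Int :=
  let n : Int := (arr.length : Int)
  (PySem.List.pyRange 0 n 1).foldl (fun count i =>
    (PySem.List.pyRange (i + 1) n 1).foldl (fun count j =>
      (PySem.List.pyRange (j + 1) n 1).foldl (fun count k =>
        if PySem.List.pyGetD arr i 0 * PySem.List.pyGetD arr j 0 * PySem.List.pyGetD arr k 0 = m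
        then count + 1 else count) count) count) 0

-- ===== PORT B =====
-- one step of B's inner loop: state = (count, later-counter, total of elements already seen behind j)
def pvInnerStep (m ai : Int) (s : Int × PySem.Dict Int Int × Int) (x : Int) : Int × PySem.Dict Int Int × Int :=
  let p := ai * x
  let c := if p = 0 then (if m = 0 then s.1 + s.2.2 else s.1)
           else if PySem.Int.mod m p = 0 then s.1 + s.2.1.getD (PySem.Int.floordiv m p) 0
           else s.1
  (c, s.2.1.insert x (s.2.1.getD x 0 + 1), s.2.2 + 1)

-- B's 'for x in reversed(rest)' loop starting from count, empty dict, total = 0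
def pvInner (m ai : Int) (rest : List Int) (count : Int) : Int :=
  (rest.reverse.foldl (pvInnerStep m ai) (count, PySem.Dict.empty, 0)).1

-- B's 'while rest: ai = rest.pop(0); …' loop
def pvOuter (m : Int) : List Int → Int → Int
  | [], count => count
  | ai :: rest, count => pvOuter m rest (pvInner m ai rest count)

def count_triplets_with_product_m_alt (m : Int) (arr : List Int) : Int :=
  pvOuter m arr 0

-- ===== PRECONDITION & SPEC =====
def Spec_count_triplets_with_product_m (m : Int) (arr : List Int) (out : Int) : Prop := out = count_triplets_with_product_m_alt m arr
instance (m : Int) (arr : List Int) (out : Int) : Decidable (Spec_count_triplets_with_product_m m arr out) := by unfold Spec_count_triplets_with_product_m; infer_instance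

-- ===== CLAIM (what is proved, stated in full; the proofs are below) =====
def Claim_equal_count_triplets_with_product_m : Prop := ∀ (m : Int) (arr : List Int), Dom_count_triplets_with_product_m m arr → Spec_count_triplets_with_product_m m arr (count_triplets_with_product_m m arr)

-- ===== LEMMAS AND PROOFS =====

-- common reference specification: number of triples i<j<k with product m, by structural recursion on tails
def pvSpec2 (m x : Int) : List Int → Int
  | [] => 0
  | y :: t => ((t.countP (fun z => x * y * z = m) : Nat) : Int) + pvSpec2 m x t

def pvSpec3 (m : Int) : List Int → Int
  | [] => 0
  | x :: t => pvSpec2 m x t + pvSpec3 m t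

-- the step amount B adds for pair (ai, x) equals the brute-force count over the elements t after x
lemma pvStep_count (m ai x : Int) (t : List Int) :
    (if ai * x = 0 then (if m = 0 then (t.length : Int) else 0)
     else if PySem.Int.mod m (ai * x) = 0 then ((t.count (PySem.Int.floordiv m (ai * x)) : Nat) : Int)
     else 0)
    = ((t.countP (fun z => ai * x * z = m) : Nat) : Int) := by
  by_cases h0 : ai * x = 0
  · rw [h0]
    by_cases hm : m = 0
    · subst hm
      simp
    · have hf : ((0:Int) = m) = False := eq_false (fun h => hm h.symm)
      simp [hm, hf]
  · rw [if_neg h0]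
    by_cases hd : ai * x ∣ m
    · rw [if_pos ((PySem.Int.mod_eq_zero_iff_dvd m (ai * x)).mpr hd)]
      have hq : ai * x * PySem.Int.floordiv m (ai * x) = m := by
        have h1 := PySem.Int.floordiv_mul_add_mod m (ai * x)
        have hm0 : PySem.Int.mod m (ai * x) = 0 := (PySem.Int.mod_eq_zero_iff_dvd m (ai * x)).mpr hd
        rw [hm0] at h1; linarith [h1]
      have hc : t.countP (fun z => decide (ai * x * z = m)) = t.count (PySem.Int.floordiv m (ai * x)) := by
        rw [List.count]
        apply List.countP_congr
        intro z _
        constructor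
        · intro hzd
          have hz : ai * x * z = m := of_decide_eq_true hzd
          have : z = PySem.Int.floordiv m (ai * x) := by
            apply mul_left_cancel₀ h0
            rw [hz, hq]
          simpa using this
        · intro hzd
          have : z = PySem.Int.floordiv m (ai * x) := by simpa using hzd
          subst this
          simp [hq]
      simp [hc]
    · rw [if_neg (fun h => hd ((PySem.Int.mod_eq_zero_iff_dvd m (ai * x)).mp h))]
      have hz : t.countP (fun z => decide (ai * x * z = m)) = 0 :=
        List.countP_eq_zero.mpr (fun z _ => by
          simp only [decide_eq_true_eq]
          intro h
          exact hd ⟨z, h.symm⟩)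
      simp [hz]

-- invariant of B's inner loop: after folding rest.reverse, count has grown by pvSpec2, the
-- dict counts exactly the elements of rest, and total is rest.length
lemma pvInner_char (m ai : Int) (rest : List Int) (c : Int) :
    (rest.reverse.foldl (pvInnerStep m ai) (c, PySem.Dict.empty, 0)).1 = c + pvSpec2 m ai rest ∧
    (∀ v, (rest.reverse.foldl (pvInnerStep m ai) (c, PySem.Dict.empty, 0)).2.1.getD v 0
          = ((rest.count v : Nat) : Int)) ∧
    (rest.reverse.foldl (pvInnerStep m ai) (c, PySem.Dict.empty, 0)).2.2 = (rest.length : Int) := by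
  induction rest with
  | nil => simp [pvSpec2, PySem.Dict.getD_empty]
  | cons x t ih =>
    have hrev : (x :: t).reverse = t.reverse ++ [x] := by simp
    rw [hrev, List.foldl_append]
    obtain ⟨ih1, ih2, ih3⟩ := ih
    set r := t.reverse.foldl (pvInnerStep m ai) (c, PySem.Dict.empty, 0) with hr
    simp only [List.foldl_cons, List.foldl_nil]
    refine ⟨?_, ?_, ?_⟩
    · show (pvInnerStep m ai r x).1 = c + pvSpec2 m ai (x :: t)
      have hstep : (pvInnerStep m ai r x).1
          = r.1 + (if ai * x = 0 then (if m = 0 then (t.length : Int) else 0)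
                   else if PySem.Int.mod m (ai * x) = 0 then ((t.count (PySem.Int.floordiv m (ai * x)) : Nat) : Int)
                   else 0) := by
        simp only [pvInnerStep]
        split_ifs with h1 h2 h3 <;> simp [ih2, ih3]
      rw [hstep, pvStep_count, ih1, pvSpec2]
      ring
    · intro v
      show ((pvInnerStep m ai r x).2.1).getD v 0 = (((x :: t).count v : Nat) : Int)
      simp only [pvInnerStep]
      rw [PySem.Dict.getD_insert]
      by_cases hv : v = x
      · subst hv
        simp [ih2]
      · simp [hv, ih2, Ne.symm hv]
    · show (pvInnerStep m ai r x).2.2 = ((x :: t).length : Int)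
      simp only [pvInnerStep, ih3, List.length_cons]
      push_cast
      ring

lemma pvInner_eq (m ai : Int) (rest : List Int) (c : Int) :
    pvInner m ai rest c = c + pvSpec2 m ai rest :=
  (pvInner_char m ai rest c).1

lemma pvOuter_eq (m : Int) (arr : List Int) : ∀ c, pvOuter m arr c = c + pvSpec3 m arr := by
  induction arr with
  | nil => intro c; simp [pvOuter, pvSpec3]
  | cons x t ih =>
    intro c
    rw [pvOuter, ih, pvInner_eq, pvSpec3]
    ring

-- A's innermost k-loop over indices equals the brute-force count over the dropped suffix
lemma pvA_inner (m a b : Int) (arr : List Int) (j : Int) (hj : 0 ≤ j) (c : Int) :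
    (PySem.List.pyRange (j + 1) (arr.length : Int) 1).foldl
      (fun count k => if a * b * PySem.List.pyGetD arr k 0 = m then count + 1 else count) c
    = c + ((arr.drop (j + 1).toNat).countP (fun z => a * b * z = m) : Int) := by
  rw [PySem.List.foldl_pyRange_pyGetD' arr 0
        (fun (count : Int) (v : Int) => if a * b * v = m then count + 1 else count) c (by omega),
      PySem.List.foldl_ite_add_one]

-- A's middle j-loop equals pvSpec2 over the dropped suffix (downward induction on the range)
lemma pvA_middle (m a : Int) (arr : List Int) :
    ∀ (fuel : Nat) (j : Int), 0 ≤ j → ((arr.length : Int) - j).toNat ≤ fuel → ∀ c,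
    (PySem.List.pyRange j (arr.length : Int) 1).foldl
      (fun count j' =>
        (PySem.List.pyRange (j' + 1) (arr.length : Int) 1).foldl
          (fun count k => if a * PySem.List.pyGetD arr j' 0 * PySem.List.pyGetD arr k 0 = m
                          then count + 1 else count) count) c
    = c + pvSpec2 m a (arr.drop j.toNat) := by
  intro fuel
  induction fuel with
  | zero =>
    intro j hj hf c
    have hge : (arr.length : Int) ≤ j := by omega
    rw [PySem.List.pyRange_one_eq_nil hge]
    have : arr.drop j.toNat = [] := List.drop_eq_nil_of_le (by omega)
    simp [this, pvSpec2]
  | succ n ih =>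
    intro j hj hf c
    by_cases hlt : j < (arr.length : Int)
    · rw [PySem.List.pyRange_one_cons hlt, List.foldl_cons]
      have hjlen : j.toNat < arr.length := by omega
      have hdrop : arr.drop j.toNat = arr[j.toNat] :: arr.drop (j.toNat + 1) :=
        List.drop_eq_getElem_cons hjlen
      have hget : PySem.List.pyGetD arr j 0 = arr[j.toNat] :=
        PySem.List.pyGetD_eq_getElem arr 0 hj (by omega)
      rw [pvA_inner m a (PySem.List.pyGetD arr j 0) arr j hj c]
      rw [ih (j + 1) (by omega) (by omega)]
      have hj1 : (j + 1).toNat = j.toNat + 1 := by omega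
      rw [hj1, hdrop, pvSpec2, hget]
      ring
    · have hge : (arr.length : Int) ≤ j := by omega
      rw [PySem.List.pyRange_one_eq_nil hge]
      have : arr.drop j.toNat = [] := List.drop_eq_nil_of_le (by omega)
      simp [this, pvSpec2]

-- A's outer i-loop equals pvSpec3 over the dropped suffix
lemma pvA_outer (m : Int) (arr : List Int) :
    ∀ (fuel : Nat) (i : Int), 0 ≤ i → ((arr.length : Int) - i).toNat ≤ fuel → ∀ c,
    (PySem.List.pyRange i (arr.length : Int) 1).foldl
      (fun count i' =>
        (PySem.List.pyRange (i' + 1) (arr.length : Int) 1).foldl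
          (fun count j =>
            (PySem.List.pyRange (j + 1) (arr.length : Int) 1).foldl
              (fun count k => if PySem.List.pyGetD arr i' 0 * PySem.List.pyGetD arr j 0 * PySem.List.pyGetD arr k 0 = m
                              then count + 1 else count) count) count) c
    = c + pvSpec3 m (arr.drop i.toNat) := by
  intro fuel
  induction fuel with
  | zero =>
    intro i hi hf c
    have hge : (arr.length : Int) ≤ i := by omega
    rw [PySem.List.pyRange_one_eq_nil hge]
    have : arr.drop i.toNat = [] := List.drop_eq_nil_of_le (by omega)
    simp [this, pvSpec3]
  | succ n ih =>
    intro i hi hf c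
    by_cases hlt : i < (arr.length : Int)
    · rw [PySem.List.pyRange_one_cons hlt, List.foldl_cons]
      have hilen : i.toNat < arr.length := by omega
      have hdrop : arr.drop i.toNat = arr[i.toNat] :: arr.drop (i.toNat + 1) :=
        List.drop_eq_getElem_cons hilen
      have hget : PySem.List.pyGetD arr i 0 = arr[i.toNat] :=
        PySem.List.pyGetD_eq_getElem arr 0 hi (by omega)
      rw [pvA_middle m (PySem.List.pyGetD arr i 0) arr ((arr.length : Int) - i).toNat (i + 1)
            (by omega) (by omega) c]
      rw [ih (i + 1) (by omega) (by omega)]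
      have hi1 : (i + 1).toNat = i.toNat + 1 := by omega
      rw [hi1, hdrop, pvSpec3, hget]
      ring
    · have hge : (arr.length : Int) ≤ i := by omega
      rw [PySem.List.pyRange_one_eq_nil hge]
      have : arr.drop i.toNat = [] := List.drop_eq_nil_of_le (by omega)
      simp [this, pvSpec3]

-- ===== VERDICT (by name: the statement is the Claim_ definition above) =====
theorem count_triplets_with_product_m_spec : Claim_equal_count_triplets_with_product_m := by
  intro m arr _
  show count_triplets_with_product_m m arr = count_triplets_with_product_m_alt m arr
  unfold count_triplets_with_product_m count_triplets_with_product_m_alt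
  rw [pvA_outer m arr ((arr.length : Int) - 0).toNat 0 le_rfl le_rfl 0]
  rw [pvOuter_eq]
  simp
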